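-- pv_equiv track=rewrite | github.com/gchamon/buzz | buzz/core/curator.py | _scan_probe_pool
-- ===== SOURCE A (Python) =====
-- def _changed_root_matches(source: str, changed_roots: list[str]) -> bool:
--     return any(
--         source == root or source.startswith(f"{root}/")
--         for root in changed_roots
--     )
--
-- def _scan_probe_pool(mapping: list[dict], changed_roots: list[str] | None) -> list[str]:
--     roots = [root.strip("/") for root in changed_roots or [] if root.strip("/")]
--     sources = [
--         source
--         for entry in mapping
--         if isinstance((source := entry.get("source")), str)
--     ]
--     if not roots:
--         return sorted(dict.fromkeys(sources))
--     return sorted(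
--         dict.fromkeys(
--             source for source in sources if _changed_root_matches(source, roots)
--         )
--     )
-- ===== SOURCE B (Python) =====
-- def _scan_probe_pool(mapping: list[dict], changed_roots: list[str] | None) -> list[str]:
--     stripped = [root.strip("/") for root in changed_roots or []]
--     root_keys = {tuple(r.split("/")) for r in stripped if r}
--     out = set()
--     for entry in mapping:
--         source = entry.get("source")
--         if isinstance(source, str):
--             if not root_keys:
--                 out.add(source)
--             else:
--                 comps = source.split("/")
--                 if any(tuple(comps[:i + 1]) in root_keys for i in range(len(comps))):
--                     out.add(source)
--     return sorted(out)
-- ===== Notes on version B (the rewrite author's own statement) =====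
-- stated objective: alternative
-- what changed: Replaces the per-source linear scan over all roots (string equality / startswith per root) by a hash set of root path-component tuples built once, against which each source is matched by looking up its component prefixes; dedup via a set in one fused pass instead of dict.fromkeys after a comprehension.
import Mathlib
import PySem

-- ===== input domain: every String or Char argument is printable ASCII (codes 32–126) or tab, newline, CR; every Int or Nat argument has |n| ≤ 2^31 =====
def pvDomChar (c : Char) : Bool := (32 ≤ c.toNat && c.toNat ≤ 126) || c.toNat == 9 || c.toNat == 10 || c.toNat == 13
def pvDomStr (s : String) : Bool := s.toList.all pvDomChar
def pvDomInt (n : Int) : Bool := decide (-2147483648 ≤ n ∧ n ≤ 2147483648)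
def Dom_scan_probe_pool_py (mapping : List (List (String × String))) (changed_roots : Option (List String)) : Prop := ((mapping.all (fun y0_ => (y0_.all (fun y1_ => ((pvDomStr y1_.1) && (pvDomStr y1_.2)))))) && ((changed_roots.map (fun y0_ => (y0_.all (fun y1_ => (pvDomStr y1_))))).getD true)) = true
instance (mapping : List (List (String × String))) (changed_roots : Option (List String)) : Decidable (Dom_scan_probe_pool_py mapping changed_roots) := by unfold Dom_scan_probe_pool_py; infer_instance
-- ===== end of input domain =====

-- B replaces A's per-source scan over all roots by a set of root component tuples
-- looked up against each source's component prefixes (alternative decomposition, same result).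

-- ===== PORT A =====
-- any(source == root or source.startswith(f"{root}/") for root in changed_roots)
def changed_root_matches (source : String) (changed_roots : List String) : Bool :=
  changed_roots.any (fun root => source == root || PySem.Str.startswith source (root ++ "/"))

def scan_probe_pool_py (mapping : List (List (String × String))) (changed_roots : Option (List String)) : List String :=
  let roots := ((changed_roots.getD []).map (fun root => PySem.Str.stripChars root "/")).filter (fun r => !(r == ""))
  -- values of the dict type here are always String, so the isinstance(..., str) test always passes;
  -- entry.get("source") = first-match association-list lookup
  let sources := mapping.filterMap (fun entry => List.lookup "source" entry)
  if roots = [] then PySem.List.sorted (PySem.List.dedup sources) (fun x => x) false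
  else PySem.List.sorted (PySem.List.dedup (sources.filter (fun source => changed_root_matches source roots))) (fun x => x) false

-- ===== PORT B =====
-- hand port of s.split("/") over List Char (exact: Python split with the one-char separator "/")
def splitSlash : List Char → List (List Char)
  | [] => [[]]
  | c :: cs =>
    let r := splitSlash cs
    if c = '/' then [] :: r else (c :: r.headI) :: r.tail

def scan_probe_pool_py_alt (mapping : List (List (String × String))) (changed_roots : Option (List String)) : List String :=
  let stripped := (changed_roots.getD []).map (fun root => PySem.Str.stripChars root "/")
  let rootKeys : PySem.Set (List (List Char)) :=
    PySem.Set.ofList ((stripped.filter (fun r => !(r == ""))).map (fun r => splitSlash r.toList))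
  let out : PySem.Set String := mapping.foldl (fun out entry =>
    match List.lookup "source" entry with
    | none => out
    | some source =>
      if rootKeys = [] then PySem.Set.add out source
      else
        if (List.range (splitSlash source.toList).length).any
            (fun i => PySem.Set.contains rootKeys ((splitSlash source.toList).take (i + 1)))
        then PySem.Set.add out source
        else out) PySem.Set.empty
  PySem.List.sorted out (fun x => x) false

-- ===== PRECONDITION & SPEC =====
def Spec_scan_probe_pool_py (mapping : List (List (String × String))) (changed_roots : Option (List String)) (out : List String) : Prop := out = scan_probe_pool_py_alt mapping changed_roots
instance (mapping : List (List (String × String))) (changed_roots : Option (List String)) (out : List String) : Decidable (Spec_scan_probe_pool_py mapping changed_roots out) := by unfold Spec_scan_probe_pool_py; infer_instance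

-- ===== CLAIM (what is proved, stated in full; the proofs are below) =====
def Claim_equal_scan_probe_pool_py : Prop := ∀ (mapping : List (List (String × String))) (changed_roots : Option (List String)), Dom_scan_probe_pool_py mapping changed_roots → Spec_scan_probe_pool_py mapping changed_roots (scan_probe_pool_py mapping changed_roots)

-- ===== LEMMAS AND PROOFS =====

theorem splitSlash_ne_nil (s : List Char) : splitSlash s ≠ [] := by
  cases s with
  | nil => simp [splitSlash]
  | cons c cs => simp only [splitSlash]; split <;> simp

theorem splitSlash_append (a b : List Char) :
    splitSlash (a ++ '/' :: b) = splitSlash a ++ splitSlash b := by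
  induction a with
  | nil => simp [splitSlash]
  | cons c a ih =>
    simp only [List.cons_append, splitSlash, ih]
    cases ha : splitSlash a with
    | nil => exact absurd ha (splitSlash_ne_nil a)
    | cons h t => split <;> simp

def joinSlash : List (List Char) → List Char
  | [] => []
  | [x] => x
  | x :: y :: t => x ++ '/' :: joinSlash (y :: t)

theorem joinSlash_cons_head (c : Char) (h : List Char) (t : List (List Char)) :
    joinSlash ((c :: h) :: t) = c :: joinSlash (h :: t) := by
  cases t <;> simp [joinSlash]

theorem joinSlash_splitSlash (s : List Char) : joinSlash (splitSlash s) = s := by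
  induction s with
  | nil => simp [splitSlash, joinSlash]
  | cons c cs ih =>
    simp only [splitSlash]
    cases hcs : splitSlash cs with
    | nil => exact absurd hcs (splitSlash_ne_nil cs)
    | cons h t =>
      rw [hcs] at ih
      split
      · next hc => subst hc; simpa [joinSlash] using ih
      · simpa [joinSlash_cons_head] using ih

theorem joinSlash_append (xs ys : List (List Char)) (hx : xs ≠ []) (hy : ys ≠ []) :
    joinSlash (xs ++ ys) = joinSlash xs ++ '/' :: joinSlash ys := by
  induction xs with
  | nil => exact absurd rfl hx
  | cons x xs ih =>
    cases xs with
    | nil =>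
      cases ys with
      | nil => exact absurd rfl hy
      | cons y t => simp [joinSlash]
    | cons x' xs' =>
      have h2 := ih (by simp)
      simp only [List.cons_append, joinSlash] at *
      simp [h2]

-- the heart: A's string test equals B's component-prefix test
theorem splitSlash_prefix_iff (r s : List Char) :
    (s = r ∨ (r ++ ['/']) <+: s) ↔ splitSlash r <+: splitSlash s := by
  constructor
  · rintro (rfl | ⟨b, rfl⟩)
    · exact List.prefix_refl _
    · rw [List.append_assoc]
      simp only [List.singleton_append, splitSlash_append]
      exact List.prefix_append _ _
  · rintro ⟨t, ht⟩
    cases t with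
    | nil =>
      left
      have h2 : joinSlash (splitSlash s) = joinSlash (splitSlash r) := by
        rw [← ht]; simp
      rwa [joinSlash_splitSlash, joinSlash_splitSlash] at h2
    | cons u t' =>
      right
      have hs : s = joinSlash (splitSlash s) := (joinSlash_splitSlash s).symm
      rw [← ht, joinSlash_append _ _ (splitSlash_ne_nil r) (by simp),
        joinSlash_splitSlash] at hs
      exact ⟨joinSlash (u :: t'), by rw [hs]; simp⟩

theorem take_prefix_iff (comps : List (List Char)) (k : List (List Char)) (hk : k ≠ []) :
    (∃ i < comps.length, comps.take (i + 1) = k) ↔ k <+: comps := by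
  constructor
  · rintro ⟨i, hi, rfl⟩; exact List.take_prefix _ _
  · intro hp
    obtain ⟨t, rfl⟩ := hp
    have h0 : 0 < k.length := List.length_pos_iff.mpr hk
    refine ⟨k.length - 1, by simp [List.length_append]; omega, ?_⟩
    have h1 : k.length - 1 + 1 = k.length := by omega
    rw [h1]
    simp

-- B's membership test over rootKeys equals A's any-over-roots test
theorem match_eq (source : String) (roots : List String) :
    ((List.range (splitSlash source.toList).length).any
      (fun i => PySem.Set.contains
        (PySem.Set.ofList (roots.map (fun r => splitSlash r.toList)))
        ((splitSlash source.toList).take (i + 1))))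
    = changed_root_matches source roots := by
  cases hm : changed_root_matches source roots
  · rw [List.any_eq_false]
    intro i hi
    simp only [List.mem_range] at hi
    simp only [PySem.Set.contains_iff, PySem.Set.mem_ofList, List.mem_map]
    rintro ⟨r, hr, hsplit⟩
    have hpre : splitSlash r.toList <+: splitSlash source.toList := by
      rw [hsplit]; exact List.take_prefix _ _
    have hdisj := (splitSlash_prefix_iff r.toList source.toList).mpr hpre
    simp only [changed_root_matches, List.any_eq_false] at hm
    have hm' := hm r hr
    simp only [Bool.or_eq_true, beq_iff_eq, not_or, PySem.Str.startswith_eq,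
      PySem.Chars.startswith_iff] at hm'
    rcases hdisj with h | h
    · exact hm'.1 (by apply String.ext; simpa using h)
    · exact hm'.2 (by simpa using h)
  · simp only [changed_root_matches, List.any_eq_true] at hm
    obtain ⟨r, hr, hmatch⟩ := hm
    simp only [Bool.or_eq_true, beq_iff_eq, PySem.Str.startswith_eq,
      PySem.Chars.startswith_iff] at hmatch
    have hpre : splitSlash r.toList <+: splitSlash source.toList := by
      apply (splitSlash_prefix_iff r.toList source.toList).mp
      rcases hmatch with h | h
      · left; rw [h]
      · right; simpa using h
    obtain ⟨i, hi, htake⟩ := (take_prefix_iff _ _ (splitSlash_ne_nil r.toList)).mpr hpre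
    rw [List.any_eq_true]
    refine ⟨i, List.mem_range.mpr hi, ?_⟩
    simp only [PySem.Set.contains_iff, PySem.Set.mem_ofList, List.mem_map]
    exact ⟨r, hr, htake.symm⟩

-- B's fold over mapping builds exactly set(filtered source list), from any accumulator
theorem fold_out (mapping : List (List (String × String))) (acc : PySem.Set String)
    (p : String → Bool) :
    mapping.foldl (fun out entry =>
      match List.lookup "source" entry with
      | none => out
      | some source => if p source then PySem.Set.add out source else out) acc
    = PySem.Set.update acc ((mapping.filterMap (fun entry => List.lookup "source" entry)).filter p) := by
  induction mapping generalizing acc with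
  | nil => simp [PySem.Set.update]
  | cons entry rest ih =>
    simp only [List.foldl_cons, List.filterMap_cons]
    cases List.lookup "source" entry with
    | none => exact ih acc
    | some source =>
      by_cases hp : p source = true
      · simp only [if_true, List.filter_cons, hp]
        rw [ih]
        simp [PySem.Set.update]
      · simp only [Bool.not_eq_true] at hp
        simp only [Bool.false_eq_true, if_false, List.filter_cons, hp]
        exact ih acc

-- ===== VERDICT (by name: the statement is the Claim_ definition above) =====
theorem scan_probe_pool_py_spec : Claim_equal_scan_probe_pool_py := by
  intro mapping changed_roots _
  show scan_probe_pool_py mapping changed_roots = scan_probe_pool_py_alt mapping changed_roots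
  simp only [scan_probe_pool_py, scan_probe_pool_py_alt]
  set roots := ((changed_roots.getD []).map (fun root => PySem.Str.stripChars root "/")).filter (fun r => !(r == "")) with hroots
  set rootKeys := PySem.Set.ofList (roots.map (fun r => splitSlash r.toList)) with hrk
  have hbody : (fun (out : PySem.Set String) (entry : List (String × String)) =>
      match List.lookup "source" entry with
      | none => out
      | some source =>
        if rootKeys = [] then PySem.Set.add out source
        else
          if (List.range (splitSlash source.toList).length).any
              (fun i => PySem.Set.contains rootKeys ((splitSlash source.toList).take (i + 1)))
          then PySem.Set.add out source
          else out)
    = (fun out entry =>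
      match List.lookup "source" entry with
      | none => out
      | some source =>
        if (if rootKeys = [] then true
            else (List.range (splitSlash source.toList).length).any
              (fun i => PySem.Set.contains rootKeys ((splitSlash source.toList).take (i + 1))))
        then PySem.Set.add out source
        else out) := by
    funext out entry
    cases List.lookup "source" entry with
    | none => rfl
    | some source => by_cases h : rootKeys = [] <;> simp [h]
  rw [hbody, fold_out]
  by_cases h : roots = []
  · have hrk0 : rootKeys = [] := by rw [hrk, h]; rfl
    rw [if_pos h]
    simp only [hrk0, if_true]
    rw [List.filter_true, PySem.Set.update_empty, PySem.List.dedup_eq_ofList]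
  · have hrk0 : rootKeys ≠ [] := by
      obtain ⟨r, rs, hr⟩ := List.exists_cons_of_ne_nil h
      rw [hrk, hr]
      simp [PySem.Set.ofList_cons]
    rw [if_neg h]
    simp only [if_neg hrk0]
    rw [PySem.Set.update_empty, PySem.List.dedup_eq_ofList]
    congr 2
    apply List.filter_congr
    intro source _
    simp only [hrk]
    exact (match_eq source roots).symm
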